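-- pv_equiv track=rewrite | github.com/raluca21b/MyWork | interval_booking.py | findAvailableIntervals
-- ===== SOURCE A (Python) =====
-- def findAvailableIntervals(booked1,limits1,booked2,limits2,meetingTime):
--     """
--     Function finds the available intervals of time for 2 people to meet
--     :param booked1: the intervals booked for the first person
--     :param limits1: the intervals of the calendar for the first person
--     :param booked2: the intervals booked for the second person
--     :param limits2: the intervals of the calendar for the second person
--     :param meetingTime: the length of the meeting
--     :return: availableIntervals: list of the free intervals of the day for both people
--     """
--     #  the limits as a booking interval
--     startAvailable = max(limits1[0],limits2[0])
--     lastAvailable = min(limits1[1],limits2[1])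
--
--
--     booked = booked1 + booked2 #reunite the all the booked interval into one single list
--     booked.sort()#sorting the list so the intervals will be in ascending order
--
--     availableIntervals =[]
--     for interval in booked:#take each interval
--         if interval[0] > startAvailable:#if the current interval starts after the available start:
--             end = interval[0]           #mark the end of the disponible time
--             if end - startAvailable >= meetingTime:   #if the gap is favorable to set a meeting
--                 availableIntervals.append([startAvailable,end]) #mark the interval as available
--             startAvailable = interval[1]      #set the next available start time (the current's interval end time)
--         elif interval[1] <= startAvailable:   #if the current interval ends before the available start, the search continues with another interval
--             continue
--         else:                                #any other way, update the next available start time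
--             startAvailable = interval[1]
--
--     ##if the last interval ends before the last available time:
--     if lastAvailable > startAvailable and lastAvailable - startAvailable >= meetingTime:
--         availableIntervals.append([startAvailable,lastAvailable])          #add the interval as available
--
--     #converte the list back into string format
--     availableIntervalsString = [[f"{interval[0]//60:02d}:{interval[0]%60:02d}",f"{interval[1]//60:02d}:{interval[1]%60:02d}"]
--                           for interval in availableIntervals]
--     return availableIntervalsString
-- ===== SOURCE B (Python) =====
-- def findAvailableIntervals(booked1, limits1, booked2, limits2, meetingTime):
--     startAvailable = max(limits1[0], limits2[0])
--     lastAvailable = min(limits1[1], limits2[1])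
--     # pass 1: merge the sorted bookings into busy blocks (a block keeps the sweep's running end)
--     merged = []
--     cur = None
--     for iv in sorted(booked1 + booked2):
--         s, e = iv[0], iv[1]
--         if cur is None:
--             cur = (s, e)
--         elif s <= cur[1]:
--             if e > cur[1]:
--                 cur = (cur[0], e)
--         else:
--             merged.append(cur)
--             cur = (s, e)
--     if cur is not None:
--         merged.append(cur)
--     # pass 2: the gap before each block; a block starting after prev hands over its end
--     available = []
--     prev = startAvailable
--     for bs, be in merged:
--         if bs > prev:
--             if bs - prev >= meetingTime:
--                 available.append([prev, bs])
--             prev = be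
--         elif be > prev:
--             prev = be
--     if lastAvailable > prev and lastAvailable - prev >= meetingTime:
--         available.append([prev, lastAvailable])
--     return [[f"{a//60:02d}:{a%60:02d}", f"{b//60:02d}:{b%60:02d}"] for a, b in available]
-- ===== Notes on version B (the rewrite author's own statement) =====
-- stated objective: alternative
-- what changed: A interleaves busy-interval handling and gap detection in one fused three-branch sweep; B decomposes it into two passes: first merge the sorted bookings into busy blocks, then scan the blocks emitting the gap before each block and the tail.
import Mathlib
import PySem

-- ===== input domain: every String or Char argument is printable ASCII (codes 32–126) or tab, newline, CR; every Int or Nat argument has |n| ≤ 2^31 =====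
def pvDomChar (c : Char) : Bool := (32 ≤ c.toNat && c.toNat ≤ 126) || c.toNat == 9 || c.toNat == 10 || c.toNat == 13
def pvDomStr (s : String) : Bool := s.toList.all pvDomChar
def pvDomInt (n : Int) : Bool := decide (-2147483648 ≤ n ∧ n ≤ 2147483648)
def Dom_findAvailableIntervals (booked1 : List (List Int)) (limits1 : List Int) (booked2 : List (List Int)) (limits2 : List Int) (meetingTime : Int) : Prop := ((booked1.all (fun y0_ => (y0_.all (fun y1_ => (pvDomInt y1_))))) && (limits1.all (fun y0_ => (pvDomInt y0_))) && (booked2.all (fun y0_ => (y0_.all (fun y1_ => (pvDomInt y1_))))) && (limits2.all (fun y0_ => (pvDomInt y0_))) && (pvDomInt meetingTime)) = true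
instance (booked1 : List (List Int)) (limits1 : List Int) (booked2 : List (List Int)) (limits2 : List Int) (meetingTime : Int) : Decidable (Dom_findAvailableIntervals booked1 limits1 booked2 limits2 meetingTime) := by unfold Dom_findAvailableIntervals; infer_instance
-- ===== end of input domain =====

-- ===== PORT A =====
-- B changes the decomposition: one fused three-branch sweep (A) vs merge-into-blocks then gap scan (B); same cost, objective: alternative.
-- shared helpers: Python's interval[i] (Pre_ guarantees the index exists) and the f"{x//60:02d}:{x%60:02d}" formatting
def pyGetI (iv : List Int) (i : Int) : Int := (PySem.List.pyGet? iv i).getD 0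
def pad2 (n : Int) : String := if (PySem.Int.toChars n).length < 2 then String.ofList ('0' :: PySem.Int.toChars n) else PySem.Int.toStr n
def fmtMin (x : Int) : String := pad2 (PySem.Int.floordiv x 60) ++ ":" ++ pad2 (PySem.Int.mod x 60)
def fmtInterval (iv : List Int) : List String := [fmtMin (pyGetI iv 0), fmtMin (pyGetI iv 1)]

-- A's single for-loop over the sorted bookings (state: startAvailable, availableIntervals)
def aLoop (mt S : Int) (acc : List (List Int)) : List (List Int) → Int × List (List Int)
  | [] => (S, acc)
  | interval :: rest =>
    if pyGetI interval 0 > S then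
      aLoop mt (pyGetI interval 1)
        (if pyGetI interval 0 - S ≥ mt then acc ++ [[S, pyGetI interval 0]] else acc) rest
    else if pyGetI interval 1 ≤ S then aLoop mt S acc rest
    else aLoop mt (pyGetI interval 1) acc rest

def findAvailableIntervals (booked1 : List (List Int)) (limits1 : List Int) (booked2 : List (List Int)) (limits2 : List Int) (meetingTime : Int) : List (List String) :=
  let startAvailable := max (pyGetI limits1 0) (pyGetI limits2 0)
  let lastAvailable := min (pyGetI limits1 1) (pyGetI limits2 1)
  let booked := PySem.List.sorted (booked1 ++ booked2) (fun x => x) false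
  let r := aLoop meetingTime startAvailable [] booked
  let availableIntervals :=
    if lastAvailable > r.1 ∧ lastAvailable - r.1 ≥ meetingTime then r.2 ++ [[r.1, lastAvailable]] else r.2
  availableIntervals.map fmtInterval

-- ===== PORT B =====
-- pass 1 of B: merge the sorted bookings into busy blocks (cur = open block, its second component the sweep's running end)
def bMerge (cur : Option (Int × Int)) (merged : List (Int × Int)) : List (List Int) → List (Int × Int)
  | [] => match cur with | none => merged | some c => merged ++ [c]
  | iv :: rest =>
    match cur with
    | none => bMerge (some (pyGetI iv 0, pyGetI iv 1)) merged rest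
    | some c =>
      if pyGetI iv 0 ≤ c.2 then
        bMerge (some (c.1, if pyGetI iv 1 > c.2 then pyGetI iv 1 else c.2)) merged rest
      else bMerge (some (pyGetI iv 0, pyGetI iv 1)) (merged ++ [c]) rest

-- pass 2 of B: the gap before each block; a block starting after prev hands over its end
def bGaps (mt prev : Int) (avail : List (List Int)) : List (Int × Int) → Int × List (List Int)
  | [] => (prev, avail)
  | b :: rest =>
    if b.1 > prev then
      bGaps mt b.2 (if b.1 - prev ≥ mt then avail ++ [[prev, b.1]] else avail) rest
    else if b.2 > prev then bGaps mt b.2 avail rest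
    else bGaps mt prev avail rest

def findAvailableIntervals_alt (booked1 : List (List Int)) (limits1 : List Int) (booked2 : List (List Int)) (limits2 : List Int) (meetingTime : Int) : List (List String) :=
  let startAvailable := max (pyGetI limits1 0) (pyGetI limits2 0)
  let lastAvailable := min (pyGetI limits1 1) (pyGetI limits2 1)
  let merged := bMerge none [] (PySem.List.sorted (booked1 ++ booked2) (fun x => x) false)
  let r := bGaps meetingTime startAvailable [] merged
  let available :=
    if lastAvailable > r.1 ∧ lastAvailable - r.1 ≥ meetingTime then r.2 ++ [[r.1, lastAvailable]] else r.2
  available.map fmtInterval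

-- ===== PRECONDITION & SPEC =====
-- Pre_ excludes exactly the inputs where A raises IndexError: both limit lists and every booked
-- interval must have the two entries A indexes (positions 0 and 1).
def Pre_findAvailableIntervals (booked1 : List (List Int)) (limits1 : List Int) (booked2 : List (List Int)) (limits2 : List Int) (meetingTime : Int) : Prop :=
  2 ≤ limits1.length ∧ 2 ≤ limits2.length ∧ ∀ iv ∈ booked1 ++ booked2, 2 ≤ iv.length
instance (booked1 : List (List Int)) (limits1 : List Int) (booked2 : List (List Int)) (limits2 : List Int) (meetingTime : Int) : Decidable (Pre_findAvailableIntervals booked1 limits1 booked2 limits2 meetingTime) := by unfold Pre_findAvailableIntervals; infer_instance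
def pvWitness_findAvailableIntervals : List (List Int) × List Int × List (List Int) × List Int × Int :=
  ([[60, 120]], [0, 600], [[300, 360]], [0, 540], 30)
def Spec_findAvailableIntervals (booked1 : List (List Int)) (limits1 : List Int) (booked2 : List (List Int)) (limits2 : List Int) (meetingTime : Int) (out : List (List String)) : Prop := out = findAvailableIntervals_alt booked1 limits1 booked2 limits2 meetingTime
instance (booked1 : List (List Int)) (limits1 : List Int) (booked2 : List (List Int)) (limits2 : List Int) (meetingTime : Int) (out : List (List String)) : Decidable (Spec_findAvailableIntervals booked1 limits1 booked2 limits2 meetingTime out) := by unfold Spec_findAvailableIntervals; infer_instance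

-- ===== CLAIM (what is proved, stated in full; the proofs are below) =====
def Claim_equal_findAvailableIntervals : Prop := ∀ (booked1 : List (List Int)) (limits1 : List Int) (booked2 : List (List Int)) (limits2 : List Int) (meetingTime : Int), Dom_findAvailableIntervals booked1 limits1 booked2 limits2 meetingTime → Pre_findAvailableIntervals booked1 limits1 booked2 limits2 meetingTime → Spec_findAvailableIntervals booked1 limits1 booked2 limits2 meetingTime (findAvailableIntervals booked1 limits1 booked2 limits2 meetingTime)

-- ===== LEMMAS AND PROOFS =====

-- the state both loops really maintain: the next free start after absorbing one interval/block (s,e)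
def sNext (s e S : Int) : Int := if s > S then e else max S e
-- the gap both loops emit before (s,e)
def gapAcc (mt S s : Int) (acc : List (List Int)) : List (List Int) :=
  if s > S ∧ s - S ≥ mt then acc ++ [[S, s]] else acc

-- closed blocks pass through bMerge untouched
lemma bMerge_append (L : List (List Int)) : ∀ (cur : Option (Int × Int)) (blocks : List (Int × Int)),
    bMerge cur blocks L = blocks ++ bMerge cur [] L := by
  induction L with
  | nil => intro cur blocks; cases cur <;> simp [bMerge]
  | cons iv rest ih =>
    intro cur blocks
    cases cur with
    | none => simp only [bMerge]; exact ih _ _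
    | some c =>
      by_cases h : pyGetI iv 0 ≤ c.2
      · simp only [bMerge, if_pos h]; exact ih _ _
      · simp only [bMerge, if_neg h, List.nil_append]
        rw [ih _ (blocks ++ [c]), ih _ [c]]
        simp

-- one step of A's three-branch loop, canonically
lemma aLoop_step (mt S : Int) (acc : List (List Int)) (iv : List Int) (rest : List (List Int)) :
    aLoop mt S acc (iv :: rest)
      = aLoop mt (sNext (pyGetI iv 0) (pyGetI iv 1) S) (gapAcc mt S (pyGetI iv 0) acc) rest := by
  have hc := max_choice S (pyGetI iv 1)
  have h1 := le_max_left S (pyGetI iv 1)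
  have h2 := le_max_right S (pyGetI iv 1)
  simp only [aLoop, sNext, gapAcc]
  by_cases hs : pyGetI iv 0 > S
  · rw [if_pos hs, if_pos hs]
    by_cases hm : pyGetI iv 0 - S ≥ mt
    · rw [if_pos hm, if_pos ⟨hs, hm⟩]
    · rw [if_neg hm, if_neg (by omega : ¬(pyGetI iv 0 > S ∧ pyGetI iv 0 - S ≥ mt))]
  · rw [if_neg hs, if_neg hs, if_neg (by omega : ¬(pyGetI iv 0 > S ∧ pyGetI iv 0 - S ≥ mt))]
    by_cases he : pyGetI iv 1 ≤ S
    · rw [if_pos he]; congr 1; omega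
    · rw [if_neg he]; congr 1; omega

-- one step of B's gap scan, canonically: the same state update and the same gap
lemma bGaps_step (mt S : Int) (avail : List (List Int)) (b : Int × Int) (rest : List (Int × Int)) :
    bGaps mt S avail (b :: rest)
      = bGaps mt (sNext b.1 b.2 S) (gapAcc mt S b.1 avail) rest := by
  have hc := max_choice S b.2
  have h1 := le_max_left S b.2
  have h2 := le_max_right S b.2
  simp only [bGaps, sNext, gapAcc]
  by_cases hs : b.1 > S
  · rw [if_pos hs, if_pos hs]
    by_cases hm : b.1 - S ≥ mt
    · rw [if_pos hm, if_pos ⟨hs, hm⟩]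
    · rw [if_neg hm, if_neg (by omega : ¬(b.1 > S ∧ b.1 - S ≥ mt))]
  · rw [if_neg hs, if_neg hs, if_neg (by omega : ¬(b.1 > S ∧ b.1 - S ≥ mt))]
    by_cases he : b.2 > S
    · rw [if_pos he]; congr 1; omega
    · rw [if_neg he]; congr 1; omega

-- core: B's gap scan over the blocks merged from open block (cs,ce) and L equals A's loop after (cs,ce)
lemma core (mt : Int) (L : List (List Int)) : ∀ (cs ce S : Int) (acc : List (List Int)),
    bGaps mt S acc (bMerge (some (cs, ce)) [] L)
      = aLoop mt (sNext cs ce S) (gapAcc mt S cs acc) L := by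
  induction L with
  | nil =>
    intro cs ce S acc
    simp only [bMerge, List.nil_append]
    rw [bGaps_step]
    simp [bGaps, aLoop]
  | cons iv rest ih =>
    intro cs ce S acc
    by_cases h : pyGetI iv 0 ≤ ce
    · -- iv is absorbed by the open block
      simp only [bMerge, if_pos h]
      rw [ih cs (if pyGetI iv 1 > ce then pyGetI iv 1 else ce) S acc]
      rw [aLoop_step mt (sNext cs ce S) _ iv rest]
      have hS : sNext cs ce S ≥ pyGetI iv 0 := by
        simp only [sNext]
        have h1 := le_max_right S ce
        split <;> omega
      have hgap : gapAcc mt (sNext cs ce S) (pyGetI iv 0) (gapAcc mt S cs acc)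
          = gapAcc mt S cs acc := by
        simp only [gapAcc]
        rw [if_neg (by omega : ¬(pyGetI iv 0 > sNext cs ce S ∧ pyGetI iv 0 - sNext cs ce S ≥ mt))]
      rw [hgap]
      have hst : sNext cs (if pyGetI iv 1 > ce then pyGetI iv 1 else ce) S
          = sNext (pyGetI iv 0) (pyGetI iv 1) (sNext cs ce S) := by
        have hc1 := max_choice S ce
        have ha := le_max_left S ce
        have hb := le_max_right S ce
        have hc2 := max_choice S (if pyGetI iv 1 > ce then pyGetI iv 1 else ce)
        have hd := le_max_left S (if pyGetI iv 1 > ce then pyGetI iv 1 else ce)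
        have he := le_max_right S (if pyGetI iv 1 > ce then pyGetI iv 1 else ce)
        have hc3 := max_choice (max S ce) (pyGetI iv 1)
        have hf := le_max_left (max S ce) (pyGetI iv 1)
        have hg := le_max_right (max S ce) (pyGetI iv 1)
        have hc4 := max_choice ce (pyGetI iv 1)
        simp only [sNext]
        split_ifs <;> omega
      rw [hst]
    · -- iv starts a new block: (cs,ce) is closed and scanned
      simp only [bMerge, if_neg h, List.nil_append]
      rw [bMerge_append rest (some (pyGetI iv 0, pyGetI iv 1)) [(cs, ce)], List.singleton_append]
      rw [bGaps_step]
      rw [ih (pyGetI iv 0) (pyGetI iv 1) (sNext cs ce S) (gapAcc mt S cs acc)]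
      rw [aLoop_step mt (sNext cs ce S) _ iv rest]

-- the two loop pipelines agree on every interval list
lemma loops_eq (mt S : Int) (acc : List (List Int)) (L : List (List Int)) :
    bGaps mt S acc (bMerge none [] L) = aLoop mt S acc L := by
  cases L with
  | nil => simp [bMerge, bGaps, aLoop]
  | cons iv rest =>
    simp only [bMerge]
    rw [core mt rest (pyGetI iv 0) (pyGetI iv 1) S acc]
    rw [aLoop_step mt S acc iv rest]

-- ===== VERDICT (by name: the statement is the Claim_ definition above) =====
theorem findAvailableIntervals_spec : Claim_equal_findAvailableIntervals := by
  intro booked1 limits1 booked2 limits2 meetingTime _ _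
  simp only [Spec_findAvailableIntervals, findAvailableIntervals, findAvailableIntervals_alt]
  rw [loops_eq]
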